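-- pv_equiv track=rewrite | github.com/simacna/Project_Euler | Project Euler/Project Euler/problem5.py | smallestDiv
-- ===== SOURCE A (Python) =====
-- def smallestDiv(n):
--
--     end=False
--     while end == False:
--         divisors = [x for x in range(1,11)]    # get divisors
--         allDivisions = zip(n % i for i in divisors)    # get values for  n % all integers in divisors
--         check = all(item[0]  == 0 for item in allDivisions )   # check if all values of n % i are equal to zero
--         if check:         # if all values are equal to zero return n
--             end =  True
--             return n
--         else:             # else increase n by 1
--             n +=1
-- ===== SOURCE B (Python) =====
-- def smallestDiv(n):
--     # smallest multiple of lcm(1..10) = 2520 that is >= n, in O(1)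
--     return -((-n) // 2520) * 2520
-- ===== Notes on version B (the rewrite author's own statement) =====
-- stated objective: faster
-- what changed: replaces the linear upward scan testing divisibility by 1..10 at every step with the closed form ceil(n/2520)*2520 using lcm(1..10)=2520
import Mathlib
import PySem

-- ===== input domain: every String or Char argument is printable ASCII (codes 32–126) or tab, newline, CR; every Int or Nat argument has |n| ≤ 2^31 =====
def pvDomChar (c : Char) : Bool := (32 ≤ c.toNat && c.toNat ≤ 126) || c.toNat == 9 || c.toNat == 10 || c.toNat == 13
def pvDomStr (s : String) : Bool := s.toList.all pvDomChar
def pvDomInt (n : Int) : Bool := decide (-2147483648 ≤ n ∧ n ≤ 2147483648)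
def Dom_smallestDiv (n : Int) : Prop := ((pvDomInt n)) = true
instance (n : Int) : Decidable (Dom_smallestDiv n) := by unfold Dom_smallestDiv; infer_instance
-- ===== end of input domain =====

-- B replaces A's linear upward scan (test n % 1..10 at each step) with the closed form
-- -((-n)//2520)*2520 = smallest multiple of lcm(1..10)=2520 that is ≥ n: asymptotically faster.


-- the loop body's check (n % i == 0 for every i in range(1,11)) is exactly divisibility by 2520
theorem pvCheck_iff (n : Int) :
    ((PySem.List.pyRange 1 11 1).all (fun i => PySem.Int.mod n i == 0)) = true ↔ (2520:Int) ∣ n := by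
  have hr : PySem.List.pyRange 1 11 1 = [1,2,3,4,5,6,7,8,9,10] := by
    rw [PySem.List.pyRange_one]
    norm_num [List.range_succ]
    decide
  rw [hr]
  simp only [List.all_cons, List.all_nil, Bool.and_eq_true, Bool.and_true, beq_iff_eq,
    PySem.Int.mod_eq_zero_iff_dvd]
  constructor
  · rintro ⟨-, -, -, -, h5, -, h7, h8, h9, -⟩
    have c89 : IsCoprime (8:Int) 9 := by rw [Int.isCoprime_iff_gcd_eq_one]; decide
    have h72 : (72:Int) ∣ n := by have := c89.mul_dvd h8 h9; norm_num at this; exact this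
    have c725 : IsCoprime (72:Int) 5 := by rw [Int.isCoprime_iff_gcd_eq_one]; decide
    have h360 : (360:Int) ∣ n := by have := c725.mul_dvd h72 h5; norm_num at this; exact this
    have c3607 : IsCoprime (360:Int) 7 := by rw [Int.isCoprime_iff_gcd_eq_one]; decide
    have := c3607.mul_dvd h360 h7; norm_num at this; exact this
  · intro h
    exact ⟨dvd_trans (by norm_num) h, dvd_trans (by norm_num) h, dvd_trans (by norm_num) h,
      dvd_trans (by norm_num) h, dvd_trans (by norm_num) h, dvd_trans (by norm_num) h,
      dvd_trans (by norm_num) h, dvd_trans (by norm_num) h, dvd_trans (by norm_num) h,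
      dvd_trans (by norm_num) h⟩

-- lemma the port needs for termination (cited in decreasing_by)
theorem pvMeasure_lt (n : Int)
    (h : ¬((PySem.List.pyRange 1 11 1).all (fun i => PySem.Int.mod n i == 0)) = true) :
    ((-(n + 1)) % 2520).toNat < ((-n) % 2520).toNat := by
  have hnd : ¬ (2520:Int) ∣ n := fun hd => h ((pvCheck_iff n).mpr hd)
  omega

-- ===== PORT A =====
def smallestDiv (n : Int) : Int :=
  let divisors := PySem.List.pyRange 1 11 1
  let check := divisors.all (fun i => PySem.Int.mod n i == 0)
  if check then n else smallestDiv (n + 1)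
termination_by ((-n) % 2520).toNat
decreasing_by
  rename_i h
  exact pvMeasure_lt n h

-- ===== PORT B =====
def smallestDiv_alt (n : Int) : Int := -(PySem.Int.floordiv (-n) 2520) * 2520

-- ===== PRECONDITION & SPEC =====
def Spec_smallestDiv (n : Int) (out : Int) : Prop := out = smallestDiv_alt n
instance (n : Int) (out : Int) : Decidable (Spec_smallestDiv n out) := by unfold Spec_smallestDiv; infer_instance

-- ===== CLAIM (what is proved, stated in full; the proofs are below) =====
def Claim_equal_smallestDiv : Prop := ∀ (n : Int), Dom_smallestDiv n → Spec_smallestDiv n (smallestDiv n)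

-- ===== LEMMAS AND PROOFS =====

theorem alt_unfold (n : Int) : smallestDiv_alt n = -((-n) / 2520) * 2520 := by
  rw [smallestDiv_alt, PySem.Int.floordiv_eq_ediv_of_pos (by norm_num : (0:Int) < 2520)]

theorem smallestDiv_eq_alt (n : Int) : smallestDiv n = smallestDiv_alt n := by
  rw [smallestDiv]
  by_cases h : ((PySem.List.pyRange 1 11 1).all (fun i => PySem.Int.mod n i == 0)) = true
  · simp only [h, if_true]
    have hd := (pvCheck_iff n).mp h
    rw [alt_unfold]
    omega
  · simp only [h, Bool.false_eq_true, if_false]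
    rw [smallestDiv_eq_alt (n + 1), alt_unfold, alt_unfold]
    have hnd : ¬ (2520:Int) ∣ n := fun hd => h ((pvCheck_iff n).mpr hd)
    omega
termination_by ((-n) % 2520).toNat
decreasing_by exact pvMeasure_lt n h

-- ===== VERDICT (by name: the statement is the Claim_ definition above) =====
theorem smallestDiv_spec : Claim_equal_smallestDiv := by
  intro n _
  exact smallestDiv_eq_alt n
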